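-- pv_equiv track=rewrite | github.com/tomas-hanicinec/AdventOfCode_2021 | day_15.py | get_cave_map
-- ===== SOURCE A (Python) =====
-- from typing import List, Tuple, Dict, Iterator
--
-- def get_cave_map(lines: List[str], multiplicator: int) -> List[List[int]]:
--     result: List[List[int]] = []
--     base_size = len(lines[0])
--     size = base_size * multiplicator
--
--     for row_i in range(size):
--         result.append([0] * size)
--         for col_i in range(size):
--             batch_row, batch_col = row_i // base_size, col_i // base_size
--             increment = batch_row + batch_col  # by how much we must increment the base value in this batch
--             base_value = int(lines[row_i - batch_row * base_size][col_i - batch_col * base_size])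
--             result[row_i][col_i] = ((base_value + increment - 1) % 9) + 1  # increase the value accordingly, 9 loops back to 1 (not 0!)
--
--     return result
-- ===== SOURCE B (Python) =====
-- def get_cave_map(lines, multiplicator):
--     base_size = len(lines[0])
--     if base_size == 0:
--         return []
--     result = []
--     for batch_row in range(multiplicator):
--         for r in range(base_size):
--             vals = [int(c) for c in lines[r][:base_size]]
--             row = []
--             for batch_col in range(multiplicator):
--                 row += [(v + batch_row + batch_col - 1) % 9 + 1 for v in vals]
--             result.append(row)
--     return result
-- ===== Notes on version B (the rewrite author's own statement) =====
-- stated objective: alternative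
-- what changed: B assembles the grid tile by tile (nested block loops over the multiplicator and the base grid, parsing each base row once per block row) instead of A's flat per-cell loop that recovers the base cell with two floor divisions per cell.
import Mathlib
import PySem

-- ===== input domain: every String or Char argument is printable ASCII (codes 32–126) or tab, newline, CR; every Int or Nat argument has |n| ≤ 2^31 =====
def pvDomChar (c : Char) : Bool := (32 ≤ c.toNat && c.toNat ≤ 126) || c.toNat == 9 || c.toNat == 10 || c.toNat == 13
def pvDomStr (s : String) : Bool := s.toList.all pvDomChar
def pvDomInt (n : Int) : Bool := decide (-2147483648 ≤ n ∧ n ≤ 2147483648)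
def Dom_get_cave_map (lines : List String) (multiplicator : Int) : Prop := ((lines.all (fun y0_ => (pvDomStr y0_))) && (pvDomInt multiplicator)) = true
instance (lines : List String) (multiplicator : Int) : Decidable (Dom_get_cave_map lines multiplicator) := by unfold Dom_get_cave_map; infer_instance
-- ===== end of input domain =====

-- B builds the tiled cave map tile-by-tile (block loops) instead of A's flat per-cell loop
-- with floor divisions; equivalence is proved on the inputs where A returns (Pre_).


-- ===== PORT A =====
def get_cave_map (lines : List String) (multiplicator : Int) : List (List Int) :=
  let base_size : Int := PySem.Str.len (lines.headD "")
  let size : Int := base_size * multiplicator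
  (PySem.List.pyRange 0 size 1).map (fun row_i =>
    (PySem.List.pyRange 0 size 1).map (fun col_i =>
      let batch_row := PySem.Int.floordiv row_i base_size
      let batch_col := PySem.Int.floordiv col_i base_size
      let increment := batch_row + batch_col
      let base_value :=
        (PySem.Int.ofChars? [(PySem.Str.pyGet?
            ((PySem.List.pyGet? lines (row_i - batch_row * base_size)).getD "")
            (col_i - batch_col * base_size)).getD '0']).getD 0
      PySem.Int.mod (base_value + increment - 1) 9 + 1))

-- ===== PORT B =====
def get_cave_map_alt (lines : List String) (multiplicator : Int) : List (List Int) :=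
  let base_size : Int := PySem.Str.len (lines.headD "")
  if base_size = 0 then [] else
  (PySem.List.pyRange 0 multiplicator 1).flatMap (fun batch_row =>
    (PySem.List.pyRange 0 base_size 1).map (fun r =>
      let vals := (PySem.Str.slice ((PySem.List.pyGet? lines r).getD "") none (some base_size)).toList.map
        (fun c => (PySem.Int.ofChars? [c]).getD 0)
      (PySem.List.pyRange 0 multiplicator 1).flatMap (fun batch_col =>
        vals.map (fun v => PySem.Int.mod (v + batch_row + batch_col - 1) 9 + 1))))

-- ===== PRECONDITION & SPEC =====
-- Pre_ is exactly where Python A returns: lines[0] must exist, and when multiplicator > 0 the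
-- first base_size lines must exist, be at least base_size long, and carry digits there
-- (otherwise A raises IndexError / ValueError).
def Pre_get_cave_map (lines : List String) (multiplicator : Int) : Prop :=
  (!lines.isEmpty &&
    (decide (multiplicator ≤ 0) ||
      (decide ((lines.headD "").toList.length ≤ lines.length) &&
        (lines.take (lines.headD "").toList.length).all (fun s =>
          decide ((lines.headD "").toList.length ≤ s.toList.length) &&
          (s.toList.take (lines.headD "").toList.length).all PySem.Chars.isdigit)))) = true
instance (lines : List String) (multiplicator : Int) : Decidable (Pre_get_cave_map lines multiplicator) := by
  unfold Pre_get_cave_map; infer_instance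

def pvWitness_get_cave_map : List String × Int := (["12", "89"], 2)

def Spec_get_cave_map (lines : List String) (multiplicator : Int) (out : List (List Int)) : Prop := out = get_cave_map_alt lines multiplicator
instance (lines : List String) (multiplicator : Int) (out : List (List Int)) : Decidable (Spec_get_cave_map lines multiplicator out) := by unfold Spec_get_cave_map; infer_instance

-- ===== CLAIM (what is proved, stated in full; the proofs are below) =====
def Claim_equal_get_cave_map : Prop := ∀ (lines : List String) (multiplicator : Int), Dom_get_cave_map lines multiplicator → Pre_get_cave_map lines multiplicator → Spec_get_cave_map lines multiplicator (get_cave_map lines multiplicator)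

-- ===== LEMMAS AND PROOFS =====

lemma range_mul_flatMap (M b : Nat) :
    List.range (M * b) = (List.range M).flatMap (fun q => (List.range b).map (fun r => q * b + r)) := by
  induction M with
  | zero => simp
  | succ M ih =>
    rw [Nat.succ_mul, List.range_add, ih, List.range_succ, List.flatMap_append]
    simp [mul_comm]

lemma map_range_getElem {α β : Type} (xs : List α) (b : Nat) (hb : b ≤ xs.length)
    (h : α → β) (d : α) :
    (List.range b).map (fun c => h ((xs[c]?).getD d)) = (xs.take b).map h := by
  apply List.ext_getElem
  · simp; omega
  · intro i h1 h2
    have hi : i < b := by simpa using h1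
    have hix : i < xs.length := lt_of_lt_of_le hi hb
    simp [List.getElem?_eq_getElem hix]

theorem get_cave_map_spec : Claim_equal_get_cave_map := by
  intro lines m _ hpre
  unfold Pre_get_cave_map at hpre
  simp only [Bool.and_eq_true, Bool.or_eq_true, decide_eq_true_eq, Bool.not_eq_true',
    List.all_eq_true, List.isEmpty_eq_false_iff] at hpre
  obtain ⟨hne, hp⟩ := hpre
  show get_cave_map lines m = get_cave_map_alt lines m
  by_cases hm : 0 < m
  case neg =>
    have hb0 : (0:Int) ≤ ((lines.headD "").toList.length : Int) := by positivity
    simp only [get_cave_map, get_cave_map_alt, PySem.Str.len_eq]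
    rw [PySem.List.pyRange_one_eq_nil (a := 0) (by nlinarith),
        PySem.List.pyRange_one_eq_nil (a := 0) (by omega)]
    simp
  case pos =>
    obtain hm0 | ⟨hrows, hlens⟩ := hp
    case inl => omega
    obtain ⟨M, rfl⟩ : ∃ M : Nat, m = (M : Int) := ⟨m.toNat, by omega⟩
    set b := (lines.headD "").toList.length with hbdef
    by_cases hbz : b = 0
    case pos =>
      simp only [get_cave_map, get_cave_map_alt, PySem.Str.len_eq, ← hbdef, hbz]
      rw [PySem.List.pyRange_one_eq_nil (a := 0) (by simp)]
      simp
    have hifneg : ¬(((b:Nat):Int) = 0) := by exact_mod_cast hbz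
    have hMb : ((b:Int) * (M:Int)) = ((M * b : Nat) : Int) := by push_cast; ring
    simp only [get_cave_map, get_cave_map_alt, PySem.Str.len_eq, ← hbdef, hMb,
      PySem.List.pyRange_zero_nat]
    rw [if_neg hifneg]
    rw [range_mul_flatMap M b]
    simp only [List.map_flatMap, List.flatMap_map, List.map_map, Function.comp_def]
    apply List.flatMap_congr
    intro q hq
    apply List.map_congr_left
    intro r hr
    have hrb : r < b := List.mem_range.mp hr
    have hb0 : 0 < b := Nat.pos_of_ne_zero (by omega)
    have hfd : ∀ (u x : Nat), x < b →
        PySem.Int.floordiv ((u*b+x : Nat) : Int) (b:Int) = (u:Int) := by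
      intro u x hx
      rw [PySem.Int.floordiv_eq_iff_of_pos (by exact_mod_cast hb0)]
      constructor
      · push_cast; nlinarith
      · push_cast [Nat.lt_iff_add_one_le] at hx ⊢; nlinarith
    rw [hfd q r hrb]
    have hsub : ((q*b+r : Nat) : Int) - (q:Int)*(b:Int) = (r:Int) := by push_cast; ring
    rw [hsub]
    have hrlen : r < lines.length := lt_of_lt_of_le hrb hrows
    have hline : (PySem.List.pyGet? lines ((r:Nat):Int)).getD "" = lines[r] := by
      rw [PySem.List.pyGet?_natCast, List.getElem?_eq_getElem hrlen]; rfl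
    rw [hline]
    have hxs : b ≤ lines[r].toList.length := by
      have hmem : lines[r] ∈ lines.take b := by
        have hg : (lines.take b)[r]'(by simp [hrb, hrlen]) = lines[r] := List.getElem_take
        exact hg ▸ List.getElem_mem _
      exact (hlens _ hmem).1
    have hslice : (PySem.Str.slice lines[r] none (some ((b:Nat):Int))).toList
        = lines[r].toList.take b := by
      rw [PySem.Str.toList_slice, PySem.Chars.slice_eq_listSlice,
        PySem.List.slice_to_natCast]
    rw [hslice]
    apply List.flatMap_congr
    intro bc hbc
    rw [← map_range_getElem lines[r].toList b hxs
      (fun ch => PySem.Int.mod ((PySem.Int.ofChars? [ch]).getD 0 + (q:Int) + (bc:Int) - 1) 9 + 1) '0']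
    apply List.map_congr_left
    intro c hc
    have hcb : c < b := List.mem_range.mp hc
    rw [hfd bc c hcb]
    have hsub2 : ((bc*b+c : Nat) : Int) - (bc:Int)*(b:Int) = (c:Int) := by push_cast; ring
    rw [hsub2, PySem.Str.pyGet?_natCast]
    have harg : ∀ z : Int, z + ((q:Int) + (bc:Int)) - 1 = z + (q:Int) + (bc:Int) - 1 := by
      intro z; ring
    rw [harg]
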